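-- pv_equiv track=rewrite | github.com/taherdoust/ai4db | stage1_enhanced_generator_stratified.py | categorize_spatial_functions
-- ===== SOURCE A (Python) =====
-- from typing import Dict, List, Optional
--
-- def categorize_spatial_functions(spatial_functions: List[str]) -> Dict[str, List[str]]:
--     """Categorize spatial functions by operation type"""
--     categories = {
--         "predicates": [],
--         "measurements": [],
--         "processing": [],
--         "clustering": [],
--         "raster": [],
--         "transforms": [],
--         "accessors": [],
--         "constructors": []
--     }
--
--     for func in spatial_functions:
--         func_upper = func.upper()
--
--         if func_upper in ['ST_INTERSECTS', 'ST_CONTAINS', 'ST_WITHIN', 'ST_TOUCHES', 'ST_OVERLAPS',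
--                          'ST_CROSSES', 'ST_DISJOINT', 'ST_EQUALS', 'ST_COVERS', 'ST_COVEREDBY', 'ST_DWITHIN']:
--             categories["predicates"].append(func)
--         elif func_upper in ['ST_AREA', 'ST_LENGTH', 'ST_DISTANCE', 'ST_PERIMETER', 'ST_3DDISTANCE']:
--             categories["measurements"].append(func)
--         elif func_upper in ['ST_BUFFER', 'ST_UNION', 'ST_INTERSECTION', 'ST_DIFFERENCE', 'ST_SYMDIFFERENCE',
--                            'ST_CONVEXHULL', 'ST_ENVELOPE', 'ST_SIMPLIFY']:
--             categories["processing"].append(func)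
--         elif 'CLUSTER' in func_upper:
--             categories["clustering"].append(func)
--         elif func_upper in ['ST_VALUE', 'ST_SUMMARYSTATS']:
--             categories["raster"].append(func)
--         elif func_upper in ['ST_TRANSFORM', 'ST_SETSRID', 'ST_FLIPCOORDINATES']:
--             categories["transforms"].append(func)
--         elif func_upper in ['ST_X', 'ST_Y', 'ST_Z', 'ST_CENTROID', 'ST_STARTPOINT', 'ST_ENDPOINT']:
--             categories["accessors"].append(func)
--         elif func_upper in ['ST_MAKEPOINT', 'ST_GEOMFROMTEXT', 'ST_COLLECT', 'ST_MAKELINE']: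
--             categories["constructors"].append(func)
--
--     return categories
-- ===== SOURCE B (Python) =====
-- from typing import Dict, List
--
-- _CATS = {
--     "predicates": ['ST_INTERSECTS', 'ST_CONTAINS', 'ST_WITHIN', 'ST_TOUCHES', 'ST_OVERLAPS',
--                    'ST_CROSSES', 'ST_DISJOINT', 'ST_EQUALS', 'ST_COVERS', 'ST_COVEREDBY', 'ST_DWITHIN'],
--     "measurements": ['ST_AREA', 'ST_LENGTH', 'ST_DISTANCE', 'ST_PERIMETER', 'ST_3DDISTANCE'],
--     "processing": ['ST_BUFFER', 'ST_UNION', 'ST_INTERSECTION', 'ST_DIFFERENCE', 'ST_SYMDIFFERENCE',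
--                    'ST_CONVEXHULL', 'ST_ENVELOPE', 'ST_SIMPLIFY'],
--     "raster": ['ST_VALUE', 'ST_SUMMARYSTATS'],
--     "transforms": ['ST_TRANSFORM', 'ST_SETSRID', 'ST_FLIPCOORDINATES'],
--     "accessors": ['ST_X', 'ST_Y', 'ST_Z', 'ST_CENTROID', 'ST_STARTPOINT', 'ST_ENDPOINT'],
--     "constructors": ['ST_MAKEPOINT', 'ST_GEOMFROMTEXT', 'ST_COLLECT', 'ST_MAKELINE'],
-- }
-- _TABLE = {fn: cat for cat, fns in _CATS.items() for fn in fns}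
--
-- def _classify(func: str):
--     u = func.upper()
--     cat = _TABLE.get(u)
--     if cat is not None:
--         return cat
--     return "clustering" if "CLUSTER" in u else None
--
-- def categorize_spatial_functions(spatial_functions: List[str]) -> Dict[str, List[str]]:
--     keys = ["predicates", "measurements", "processing", "clustering",
--             "raster", "transforms", "accessors", "constructors"]
--     return {c: [f for f in spatial_functions if _classify(f) == c] for c in keys}
-- ===== Notes on version B (the rewrite author's own statement) =====
-- stated objective: simpler
-- what changed: Replaces the eight-way if/elif cascade of list-membership scans inside one dict-mutating loop by a precomputed name-to-category lookup table (with the CLUSTER substring fallback) and a per-category filter comprehension over the input list.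
import Mathlib
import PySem

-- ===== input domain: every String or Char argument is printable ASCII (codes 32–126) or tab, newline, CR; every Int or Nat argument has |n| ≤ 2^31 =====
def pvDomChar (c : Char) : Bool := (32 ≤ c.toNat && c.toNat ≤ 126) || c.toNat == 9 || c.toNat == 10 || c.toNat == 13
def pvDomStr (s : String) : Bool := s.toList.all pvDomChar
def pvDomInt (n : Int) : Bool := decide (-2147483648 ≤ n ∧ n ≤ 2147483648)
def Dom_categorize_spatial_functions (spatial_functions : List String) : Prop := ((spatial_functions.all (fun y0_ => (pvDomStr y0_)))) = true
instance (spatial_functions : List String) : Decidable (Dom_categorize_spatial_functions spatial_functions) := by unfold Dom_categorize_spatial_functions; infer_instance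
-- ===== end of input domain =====

-- B replaces A's eight-way if/elif cascade of list-membership scans by a lookup table plus
-- per-category filters (objective: simpler); return values agree on every input.

-- ===== PORT A =====
def pvStepA (categories : PySem.Dict String (List String)) (func : String) :
    PySem.Dict String (List String) :=
  let func_upper := PySem.Str.upper func
  if func_upper ∈ ["ST_INTERSECTS", "ST_CONTAINS", "ST_WITHIN", "ST_TOUCHES", "ST_OVERLAPS",
      "ST_CROSSES", "ST_DISJOINT", "ST_EQUALS", "ST_COVERS", "ST_COVEREDBY", "ST_DWITHIN"] then
    categories.modify "predicates" [] (· ++ [func])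
  else if func_upper ∈ ["ST_AREA", "ST_LENGTH", "ST_DISTANCE", "ST_PERIMETER", "ST_3DDISTANCE"] then
    categories.modify "measurements" [] (· ++ [func])
  else if func_upper ∈ ["ST_BUFFER", "ST_UNION", "ST_INTERSECTION", "ST_DIFFERENCE", "ST_SYMDIFFERENCE",
      "ST_CONVEXHULL", "ST_ENVELOPE", "ST_SIMPLIFY"] then
    categories.modify "processing" [] (· ++ [func])
  else if PySem.Str.isIn "CLUSTER" func_upper then
    categories.modify "clustering" [] (· ++ [func])
  else if func_upper ∈ ["ST_VALUE", "ST_SUMMARYSTATS"] then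
    categories.modify "raster" [] (· ++ [func])
  else if func_upper ∈ ["ST_TRANSFORM", "ST_SETSRID", "ST_FLIPCOORDINATES"] then
    categories.modify "transforms" [] (· ++ [func])
  else if func_upper ∈ ["ST_X", "ST_Y", "ST_Z", "ST_CENTROID", "ST_STARTPOINT", "ST_ENDPOINT"] then
    categories.modify "accessors" [] (· ++ [func])
  else if func_upper ∈ ["ST_MAKEPOINT", "ST_GEOMFROMTEXT", "ST_COLLECT", "ST_MAKELINE"] then
    categories.modify "constructors" [] (· ++ [func])
  else
    categories

def categorize_spatial_functions (spatial_functions : List String) : List (String × List String) :=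
  let categories : PySem.Dict String (List String) := PySem.Dict.mk
    [("predicates", []), ("measurements", []), ("processing", []), ("clustering", []),
     ("raster", []), ("transforms", []), ("accessors", []), ("constructors", [])]
  (spatial_functions.foldl pvStepA categories).items

-- ===== PORT B =====
def pvTable : PySem.Dict String String := PySem.Dict.mk
  [("ST_INTERSECTS", "predicates"),
   ("ST_CONTAINS", "predicates"),
   ("ST_WITHIN", "predicates"),
   ("ST_TOUCHES", "predicates"),
   ("ST_OVERLAPS", "predicates"),
   ("ST_CROSSES", "predicates"),
   ("ST_DISJOINT", "predicates"),
   ("ST_EQUALS", "predicates"),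
   ("ST_COVERS", "predicates"),
   ("ST_COVEREDBY", "predicates"),
   ("ST_DWITHIN", "predicates"),
   ("ST_AREA", "measurements"),
   ("ST_LENGTH", "measurements"),
   ("ST_DISTANCE", "measurements"),
   ("ST_PERIMETER", "measurements"),
   ("ST_3DDISTANCE", "measurements"),
   ("ST_BUFFER", "processing"),
   ("ST_UNION", "processing"),
   ("ST_INTERSECTION", "processing"),
   ("ST_DIFFERENCE", "processing"),
   ("ST_SYMDIFFERENCE", "processing"),
   ("ST_CONVEXHULL", "processing"),
   ("ST_ENVELOPE", "processing"),
   ("ST_SIMPLIFY", "processing"),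
   ("ST_VALUE", "raster"),
   ("ST_SUMMARYSTATS", "raster"),
   ("ST_TRANSFORM", "transforms"),
   ("ST_SETSRID", "transforms"),
   ("ST_FLIPCOORDINATES", "transforms"),
   ("ST_X", "accessors"),
   ("ST_Y", "accessors"),
   ("ST_Z", "accessors"),
   ("ST_CENTROID", "accessors"),
   ("ST_STARTPOINT", "accessors"),
   ("ST_ENDPOINT", "accessors"),
   ("ST_MAKEPOINT", "constructors"),
   ("ST_GEOMFROMTEXT", "constructors"),
   ("ST_COLLECT", "constructors"),
   ("ST_MAKELINE", "constructors")]

def pvClassify (func : String) : Option String :=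
  let u := PySem.Str.upper func
  match pvTable.get? u with
  | some cat => some cat
  | none => if PySem.Str.isIn "CLUSTER" u then some "clustering" else none

def categorize_spatial_functions_alt (spatial_functions : List String) : List (String × List String) :=
  ["predicates", "measurements", "processing", "clustering",
   "raster", "transforms", "accessors", "constructors"].map
    (fun c => (c, spatial_functions.filter (fun f => pvClassify f == some c)))

-- ===== PRECONDITION & SPEC =====
def Spec_categorize_spatial_functions (spatial_functions : List String) (out : List (String × List String)) : Prop := out = categorize_spatial_functions_alt spatial_functions
instance (spatial_functions : List String) (out : List (String × List String)) : Decidable (Spec_categorize_spatial_functions spatial_functions out) := by unfold Spec_categorize_spatial_functions; infer_instance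

-- ===== CLAIM (what is proved, stated in full; the proofs are below) =====
def Claim_equal_categorize_spatial_functions : Prop := ∀ (spatial_functions : List String), Dom_categorize_spatial_functions spatial_functions → Spec_categorize_spatial_functions spatial_functions (categorize_spatial_functions spatial_functions)

-- ===== LEMMAS AND PROOFS =====

theorem pv_key_predicates : ∀ u ∈ (["ST_INTERSECTS", "ST_CONTAINS", "ST_WITHIN", "ST_TOUCHES", "ST_OVERLAPS", "ST_CROSSES", "ST_DISJOINT", "ST_EQUALS", "ST_COVERS", "ST_COVEREDBY", "ST_DWITHIN"] : List String), pvTable.get? u = some "predicates" := by decide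
theorem pv_key_measurements : ∀ u ∈ (["ST_AREA", "ST_LENGTH", "ST_DISTANCE", "ST_PERIMETER", "ST_3DDISTANCE"] : List String), pvTable.get? u = some "measurements" := by decide
theorem pv_key_processing : ∀ u ∈ (["ST_BUFFER", "ST_UNION", "ST_INTERSECTION", "ST_DIFFERENCE", "ST_SYMDIFFERENCE", "ST_CONVEXHULL", "ST_ENVELOPE", "ST_SIMPLIFY"] : List String), pvTable.get? u = some "processing" := by decide
theorem pv_key_raster : ∀ u ∈ (["ST_VALUE", "ST_SUMMARYSTATS"] : List String), pvTable.get? u = some "raster" := by decide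
theorem pv_key_transforms : ∀ u ∈ (["ST_TRANSFORM", "ST_SETSRID", "ST_FLIPCOORDINATES"] : List String), pvTable.get? u = some "transforms" := by decide
theorem pv_key_accessors : ∀ u ∈ (["ST_X", "ST_Y", "ST_Z", "ST_CENTROID", "ST_STARTPOINT", "ST_ENDPOINT"] : List String), pvTable.get? u = some "accessors" := by decide
theorem pv_key_constructors : ∀ u ∈ (["ST_MAKEPOINT", "ST_GEOMFROMTEXT", "ST_COLLECT", "ST_MAKELINE"] : List String), pvTable.get? u = some "constructors" := by decide
theorem pv_cluster_raster : ∀ u ∈ (["ST_VALUE", "ST_SUMMARYSTATS"] : List String), PySem.Str.isIn "CLUSTER" u = false := by decide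
theorem pv_cluster_transforms : ∀ u ∈ (["ST_TRANSFORM", "ST_SETSRID", "ST_FLIPCOORDINATES"] : List String), PySem.Str.isIn "CLUSTER" u = false := by decide
theorem pv_cluster_accessors : ∀ u ∈ (["ST_X", "ST_Y", "ST_Z", "ST_CENTROID", "ST_STARTPOINT", "ST_ENDPOINT"] : List String), PySem.Str.isIn "CLUSTER" u = false := by decide
theorem pv_cluster_constructors : ∀ u ∈ (["ST_MAKEPOINT", "ST_GEOMFROMTEXT", "ST_COLLECT", "ST_MAKELINE"] : List String), PySem.Str.isIn "CLUSTER" u = false := by decide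

theorem pv_nomatch (u : String) (n1 : u ∉ (["ST_INTERSECTS", "ST_CONTAINS", "ST_WITHIN", "ST_TOUCHES", "ST_OVERLAPS", "ST_CROSSES", "ST_DISJOINT", "ST_EQUALS", "ST_COVERS", "ST_COVEREDBY", "ST_DWITHIN"] : List String)) (n2 : u ∉ (["ST_AREA", "ST_LENGTH", "ST_DISTANCE", "ST_PERIMETER", "ST_3DDISTANCE"] : List String)) (n3 : u ∉ (["ST_BUFFER", "ST_UNION", "ST_INTERSECTION", "ST_DIFFERENCE", "ST_SYMDIFFERENCE", "ST_CONVEXHULL", "ST_ENVELOPE", "ST_SIMPLIFY"] : List String)) (n4 : u ∉ (["ST_VALUE", "ST_SUMMARYSTATS"] : List String)) (n5 : u ∉ (["ST_TRANSFORM", "ST_SETSRID", "ST_FLIPCOORDINATES"] : List String)) (n6 : u ∉ (["ST_X", "ST_Y", "ST_Z", "ST_CENTROID", "ST_STARTPOINT", "ST_ENDPOINT"] : List String)) (n7 : u ∉ (["ST_MAKEPOINT", "ST_GEOMFROMTEXT", "ST_COLLECT", "ST_MAKELINE"] : List String)) : pvTable.get? u = none := by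
  simp only [List.mem_cons, not_or, List.not_mem_nil, or_false] at n1 n2 n3 n4 n5 n6 n7
  obtain ⟨a1_1, a1_2, a1_3, a1_4, a1_5, a1_6, a1_7, a1_8, a1_9, a1_10, a1_11⟩ := n1
  obtain ⟨a2_1, a2_2, a2_3, a2_4, a2_5⟩ := n2
  obtain ⟨a3_1, a3_2, a3_3, a3_4, a3_5, a3_6, a3_7, a3_8⟩ := n3
  obtain ⟨a4_1, a4_2⟩ := n4
  obtain ⟨a5_1, a5_2, a5_3⟩ := n5
  obtain ⟨a6_1, a6_2, a6_3, a6_4, a6_5, a6_6⟩ := n6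
  obtain ⟨a7_1, a7_2, a7_3, a7_4⟩ := n7
  have hnil : (PySem.Dict.mk ([] : List (String × String))).get? u = none := rfl
  simp [pvTable, PySem.Dict.get?_mk_cons, hnil, Ne.symm a1_1, Ne.symm a1_2, Ne.symm a1_3, Ne.symm a1_4, Ne.symm a1_5, Ne.symm a1_6, Ne.symm a1_7, Ne.symm a1_8, Ne.symm a1_9, Ne.symm a1_10, Ne.symm a1_11, Ne.symm a2_1, Ne.symm a2_2, Ne.symm a2_3, Ne.symm a2_4, Ne.symm a2_5, Ne.symm a3_1, Ne.symm a3_2, Ne.symm a3_3, Ne.symm a3_4, Ne.symm a3_5, Ne.symm a3_6, Ne.symm a3_7, Ne.symm a3_8, Ne.symm a4_1, Ne.symm a4_2, Ne.symm a5_1, Ne.symm a5_2, Ne.symm a5_3, Ne.symm a6_1, Ne.symm a6_2, Ne.symm a6_3, Ne.symm a6_4, Ne.symm a6_5, Ne.symm a6_6, Ne.symm a7_1, Ne.symm a7_2, Ne.symm a7_3, Ne.symm a7_4]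

theorem pv_mod_predicates (p m pr cl r t ac co : List String) (f : String) :
    (PySem.Dict.mk ([("predicates", p), ("measurements", m), ("processing", pr), ("clustering", cl), ("raster", r), ("transforms", t), ("accessors", ac), ("constructors", co)] : List (String × List String))).modify "predicates" [] (· ++ [f])
      = PySem.Dict.mk [("predicates", p ++ [f]), ("measurements", m), ("processing", pr), ("clustering", cl), ("raster", r), ("transforms", t), ("accessors", ac), ("constructors", co)] := by
  simp [PySem.Dict.modify, PySem.Dict.contains, PySem.Dict.getD, PySem.Dict.get?, PySem.Dict.insert]

theorem pv_mod_measurements (p m pr cl r t ac co : List String) (f : String) :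
    (PySem.Dict.mk ([("predicates", p), ("measurements", m), ("processing", pr), ("clustering", cl), ("raster", r), ("transforms", t), ("accessors", ac), ("constructors", co)] : List (String × List String))).modify "measurements" [] (· ++ [f])
      = PySem.Dict.mk [("predicates", p), ("measurements", m ++ [f]), ("processing", pr), ("clustering", cl), ("raster", r), ("transforms", t), ("accessors", ac), ("constructors", co)] := by
  simp [PySem.Dict.modify, PySem.Dict.contains, PySem.Dict.getD, PySem.Dict.get?, PySem.Dict.insert]

theorem pv_mod_processing (p m pr cl r t ac co : List String) (f : String) :
    (PySem.Dict.mk ([("predicates", p), ("measurements", m), ("processing", pr), ("clustering", cl), ("raster", r), ("transforms", t), ("accessors", ac), ("constructors", co)] : List (String × List String))).modify "processing" [] (· ++ [f])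
      = PySem.Dict.mk [("predicates", p), ("measurements", m), ("processing", pr ++ [f]), ("clustering", cl), ("raster", r), ("transforms", t), ("accessors", ac), ("constructors", co)] := by
  simp [PySem.Dict.modify, PySem.Dict.contains, PySem.Dict.getD, PySem.Dict.get?, PySem.Dict.insert]

theorem pv_mod_clustering (p m pr cl r t ac co : List String) (f : String) :
    (PySem.Dict.mk ([("predicates", p), ("measurements", m), ("processing", pr), ("clustering", cl), ("raster", r), ("transforms", t), ("accessors", ac), ("constructors", co)] : List (String × List String))).modify "clustering" [] (· ++ [f])
      = PySem.Dict.mk [("predicates", p), ("measurements", m), ("processing", pr), ("clustering", cl ++ [f]), ("raster", r), ("transforms", t), ("accessors", ac), ("constructors", co)] := by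
  simp [PySem.Dict.modify, PySem.Dict.contains, PySem.Dict.getD, PySem.Dict.get?, PySem.Dict.insert]

theorem pv_mod_raster (p m pr cl r t ac co : List String) (f : String) :
    (PySem.Dict.mk ([("predicates", p), ("measurements", m), ("processing", pr), ("clustering", cl), ("raster", r), ("transforms", t), ("accessors", ac), ("constructors", co)] : List (String × List String))).modify "raster" [] (· ++ [f])
      = PySem.Dict.mk [("predicates", p), ("measurements", m), ("processing", pr), ("clustering", cl), ("raster", r ++ [f]), ("transforms", t), ("accessors", ac), ("constructors", co)] := by
  simp [PySem.Dict.modify, PySem.Dict.contains, PySem.Dict.getD, PySem.Dict.get?, PySem.Dict.insert]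

theorem pv_mod_transforms (p m pr cl r t ac co : List String) (f : String) :
    (PySem.Dict.mk ([("predicates", p), ("measurements", m), ("processing", pr), ("clustering", cl), ("raster", r), ("transforms", t), ("accessors", ac), ("constructors", co)] : List (String × List String))).modify "transforms" [] (· ++ [f])
      = PySem.Dict.mk [("predicates", p), ("measurements", m), ("processing", pr), ("clustering", cl), ("raster", r), ("transforms", t ++ [f]), ("accessors", ac), ("constructors", co)] := by
  simp [PySem.Dict.modify, PySem.Dict.contains, PySem.Dict.getD, PySem.Dict.get?, PySem.Dict.insert]

theorem pv_mod_accessors (p m pr cl r t ac co : List String) (f : String) :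
    (PySem.Dict.mk ([("predicates", p), ("measurements", m), ("processing", pr), ("clustering", cl), ("raster", r), ("transforms", t), ("accessors", ac), ("constructors", co)] : List (String × List String))).modify "accessors" [] (· ++ [f])
      = PySem.Dict.mk [("predicates", p), ("measurements", m), ("processing", pr), ("clustering", cl), ("raster", r), ("transforms", t), ("accessors", ac ++ [f]), ("constructors", co)] := by
  simp [PySem.Dict.modify, PySem.Dict.contains, PySem.Dict.getD, PySem.Dict.get?, PySem.Dict.insert]

theorem pv_mod_constructors (p m pr cl r t ac co : List String) (f : String) :
    (PySem.Dict.mk ([("predicates", p), ("measurements", m), ("processing", pr), ("clustering", cl), ("raster", r), ("transforms", t), ("accessors", ac), ("constructors", co)] : List (String × List String))).modify "constructors" [] (· ++ [f])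
      = PySem.Dict.mk [("predicates", p), ("measurements", m), ("processing", pr), ("clustering", cl), ("raster", r), ("transforms", t), ("accessors", ac), ("constructors", co ++ [f])] := by
  simp [PySem.Dict.modify, PySem.Dict.contains, PySem.Dict.getD, PySem.Dict.get?, PySem.Dict.insert]

theorem categorize_spatial_functions_loop (fs : List String)
    (p m pr cl r t ac co : List String) :
    (fs.foldl pvStepA (PySem.Dict.mk
      ([("predicates", p), ("measurements", m), ("processing", pr), ("clustering", cl), ("raster", r), ("transforms", t), ("accessors", ac), ("constructors", co)] : List (String × List String)))).items
    = [("predicates", p ++ fs.filter (fun f => pvClassify f == some "predicates")),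
       ("measurements", m ++ fs.filter (fun f => pvClassify f == some "measurements")),
       ("processing", pr ++ fs.filter (fun f => pvClassify f == some "processing")),
       ("clustering", cl ++ fs.filter (fun f => pvClassify f == some "clustering")),
       ("raster", r ++ fs.filter (fun f => pvClassify f == some "raster")),
       ("transforms", t ++ fs.filter (fun f => pvClassify f == some "transforms")),
       ("accessors", ac ++ fs.filter (fun f => pvClassify f == some "accessors")),
       ("constructors", co ++ fs.filter (fun f => pvClassify f == some "constructors"))] := by
  induction fs generalizing p m pr cl r t ac co with
  | nil => simp [PySem.Dict.items]
  | cons f fs ih =>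
    rw [List.foldl_cons]
    simp only [pvStepA]
    by_cases h1 : PySem.Str.upper f ∈ (["ST_INTERSECTS", "ST_CONTAINS", "ST_WITHIN", "ST_TOUCHES", "ST_OVERLAPS", "ST_CROSSES", "ST_DISJOINT", "ST_EQUALS", "ST_COVERS", "ST_COVEREDBY", "ST_DWITHIN"] : List String)
    · rw [if_pos h1, pv_mod_predicates, ih]
      have hclass : pvClassify f = some "predicates" := by simp [pvClassify, pv_key_predicates _ h1]
      simp [hclass]
    · rw [if_neg h1]
      by_cases h2 : PySem.Str.upper f ∈ (["ST_AREA", "ST_LENGTH", "ST_DISTANCE", "ST_PERIMETER", "ST_3DDISTANCE"] : List String)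
      · rw [if_pos h2, pv_mod_measurements, ih]
        have hclass : pvClassify f = some "measurements" := by simp [pvClassify, pv_key_measurements _ h2]
        simp [hclass]
      · rw [if_neg h2]
        by_cases h3 : PySem.Str.upper f ∈ (["ST_BUFFER", "ST_UNION", "ST_INTERSECTION", "ST_DIFFERENCE", "ST_SYMDIFFERENCE", "ST_CONVEXHULL", "ST_ENVELOPE", "ST_SIMPLIFY"] : List String)
        · rw [if_pos h3, pv_mod_processing, ih]
          have hclass : pvClassify f = some "processing" := by simp [pvClassify, pv_key_processing _ h3]
          simp [hclass]
        · rw [if_neg h3]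
          by_cases h4 : PySem.Str.isIn "CLUSTER" (PySem.Str.upper f) = true
          · rw [if_pos h4, pv_mod_clustering, ih]
            have hclass : pvClassify f = some "clustering" := by
              have hn5 : PySem.Str.upper f ∉ (["ST_VALUE", "ST_SUMMARYSTATS"] : List String) := fun hm => by rw [pv_cluster_raster _ hm] at h4; simp at h4
              have hn6 : PySem.Str.upper f ∉ (["ST_TRANSFORM", "ST_SETSRID", "ST_FLIPCOORDINATES"] : List String) := fun hm => by rw [pv_cluster_transforms _ hm] at h4; simp at h4
              have hn7 : PySem.Str.upper f ∉ (["ST_X", "ST_Y", "ST_Z", "ST_CENTROID", "ST_STARTPOINT", "ST_ENDPOINT"] : List String) := fun hm => by rw [pv_cluster_accessors _ hm] at h4; simp at h4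
              have hn8 : PySem.Str.upper f ∉ (["ST_MAKEPOINT", "ST_GEOMFROMTEXT", "ST_COLLECT", "ST_MAKELINE"] : List String) := fun hm => by rw [pv_cluster_constructors _ hm] at h4; simp at h4
              have h4' : PySem.Chars.isIn ['C', 'L', 'U', 'S', 'T', 'E', 'R'] (PySem.Chars.upper f.toList) = true := by simpa using h4
              simp [pvClassify, pv_nomatch _ h1 h2 h3 hn5 hn6 hn7 hn8, h4']
            simp [hclass]
          · rw [if_neg h4]
            by_cases h5 : PySem.Str.upper f ∈ (["ST_VALUE", "ST_SUMMARYSTATS"] : List String)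
            · rw [if_pos h5, pv_mod_raster, ih]
              have hclass : pvClassify f = some "raster" := by simp [pvClassify, pv_key_raster _ h5]
              simp [hclass]
            · rw [if_neg h5]
              by_cases h6 : PySem.Str.upper f ∈ (["ST_TRANSFORM", "ST_SETSRID", "ST_FLIPCOORDINATES"] : List String)
              · rw [if_pos h6, pv_mod_transforms, ih]
                have hclass : pvClassify f = some "transforms" := by simp [pvClassify, pv_key_transforms _ h6]
                simp [hclass]
              · rw [if_neg h6]
                by_cases h7 : PySem.Str.upper f ∈ (["ST_X", "ST_Y", "ST_Z", "ST_CENTROID", "ST_STARTPOINT", "ST_ENDPOINT"] : List String)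
                · rw [if_pos h7, pv_mod_accessors, ih]
                  have hclass : pvClassify f = some "accessors" := by simp [pvClassify, pv_key_accessors _ h7]
                  simp [hclass]
                · rw [if_neg h7]
                  by_cases h8 : PySem.Str.upper f ∈ (["ST_MAKEPOINT", "ST_GEOMFROMTEXT", "ST_COLLECT", "ST_MAKELINE"] : List String)
                  · rw [if_pos h8, pv_mod_constructors, ih]
                    have hclass : pvClassify f = some "constructors" := by simp [pvClassify, pv_key_constructors _ h8]
                    simp [hclass]
                  · rw [if_neg h8]
                    rw [ih]
                    have hclass : pvClassify f = none := by
                      have h4' : PySem.Chars.isIn ['C', 'L', 'U', 'S', 'T', 'E', 'R'] (PySem.Chars.upper f.toList) = false := by simpa using h4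
                      simp [pvClassify, pv_nomatch _ h1 h2 h3 h5 h6 h7 h8, h4']
                    simp [hclass]


-- ===== VERDICT (by name: the statement is the Claim_ definition above) =====
theorem categorize_spatial_functions_spec : Claim_equal_categorize_spatial_functions := by
  intro fs _
  show _ = _
  simpa [categorize_spatial_functions, categorize_spatial_functions_alt] using
    categorize_spatial_functions_loop fs [] [] [] [] [] [] [] []
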